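-- pv_equiv track=rewrite | github.com/Ramnarayan-Choudhary/ugrip_rc | ugrip_week1_v2.py | masked_data
-- ===== SOURCE A (Python) =====
-- def masked_data(data):
--     for item in data['data']:
--         unmasked_cnt = 0
--         for unit in item:
--             if unit != "?" and unit != "":
--                 unmasked_cnt += 1
--         for idx, unit in enumerate(item):
--             if unit != "?" and unit != "":
--                 if unmasked_cnt > 1:
--                     item[idx] = "[MASK]"
--                     unmasked_cnt -= 1
--
--     return data
-- ===== SOURCE B (Python) =====
-- def masked_data(data):
--     for item in data['data']:
--         valid_idxs = [i for i, u in enumerate(item) if u not in ("?", "")]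
--         if valid_idxs:
--             last = valid_idxs[-1]
--             item[:] = ["[MASK]" if u not in ("?", "") and i != last else u
--                        for i, u in enumerate(item)]
--     return data
-- ===== Notes on version B (the rewrite author's own statement) =====
-- stated objective: alternative
-- what changed: A makes a counting pass then a forward masking pass that decrements a counter while it exceeds 1; B instead materialises the list of valid indices via enumerate, takes its last element, and rebuilds the row in one comprehension masking every valid unit whose index differs from that last index.
import Mathlib
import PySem

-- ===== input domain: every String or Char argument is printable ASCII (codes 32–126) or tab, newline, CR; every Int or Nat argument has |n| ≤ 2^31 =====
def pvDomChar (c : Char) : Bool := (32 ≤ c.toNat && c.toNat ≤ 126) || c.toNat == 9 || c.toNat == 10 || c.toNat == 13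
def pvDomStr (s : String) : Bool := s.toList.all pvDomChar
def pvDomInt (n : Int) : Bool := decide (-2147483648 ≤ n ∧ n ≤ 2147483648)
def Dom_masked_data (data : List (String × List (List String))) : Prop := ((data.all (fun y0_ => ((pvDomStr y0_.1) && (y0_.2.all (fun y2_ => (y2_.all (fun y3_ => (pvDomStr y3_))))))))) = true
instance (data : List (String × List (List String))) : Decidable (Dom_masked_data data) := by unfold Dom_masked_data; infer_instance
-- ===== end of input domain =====

-- B replaces A's count-then-mask counter loops by an index computation: collect the valid
-- indices with enumerate, keep the last one, rebuild the row in one comprehension.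
-- Both Pythons mutate the row lists of data['data'] in place and return the same dict
-- object; the Lean ports model the returned value.

-- ===== PORT A =====
-- second loop of A: scan forward, masking a valid unit while the counter exceeds 1
def maskLoopA : List String → Nat → List String
  | [], _ => []
  | u :: rest, cnt =>
    if u ≠ "?" ∧ u ≠ "" then
      if cnt > 1 then "[MASK]" :: maskLoopA rest (cnt - 1)
      else u :: maskLoopA rest cnt
    else u :: maskLoopA rest cnt

-- per-row body of A: first loop counts the valid units, second loop masks
def maskItemA (item : List String) : List String :=
  maskLoopA item (item.foldl (fun n u => if u ≠ "?" ∧ u ≠ "" then n + 1 else n) 0)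

def masked_data (data : List (String × List (List String))) : List (String × List (List String)) :=
  data.map (fun kv => if kv.1 == "data" then (kv.1, kv.2.map maskItemA) else kv)

-- ===== PORT B =====
-- u not in ("?", "")
def validB (u : String) : Bool := !(u == "?" || u == "")

-- per-row body of B: valid index list, its last element, one rebuilding comprehension
def maskItemB (item : List String) : List String :=
  let validIdxs := ((PySem.List.enumerate item).filter (fun p => validB p.2)).map (·.1)
  match validIdxs.getLast? with          -- 'if valid_idxs: last = valid_idxs[-1]'
  | none => item
  | some last =>
      (PySem.List.enumerate item).map
        (fun p => if validB p.2 && p.1 != last then "[MASK]" else p.2)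

def masked_data_alt (data : List (String × List (List String))) : List (String × List (List String)) :=
  data.map (fun kv => (kv.1, if kv.1 == "data" then kv.2.map maskItemB else kv.2))

-- ===== PRECONDITION & SPEC =====
-- Pre_ excludes only inputs whose dict has no "data" key: Python A (and B) raise KeyError there.
def Pre_masked_data (data : List (String × List (List String))) : Prop :=
  "data" ∈ data.map Prod.fst
instance (data : List (String × List (List String))) : Decidable (Pre_masked_data data) := by
  unfold Pre_masked_data; infer_instance

def pvWitness_masked_data : (List (String × List (List String))) :=
  [("data", [["a", "?", "", "b", "c"], ["?"]])]

def Spec_masked_data (data : List (String × List (List String))) (out : List (String × List (List String))) : Prop := out = masked_data_alt data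
instance (data : List (String × List (List String))) (out : List (String × List (List String))) : Decidable (Spec_masked_data data out) := by unfold Spec_masked_data; infer_instance

-- ===== CLAIM =====
def Claim_equal_masked_data : Prop := ∀ (data : List (String × List (List String))), Dom_masked_data data → Pre_masked_data data → Spec_masked_data data (masked_data data)

-- ===== LEMMAS AND PROOFS =====

-- "valid" predicate used by the analysis (not by the ports)
def pvV (u : String) : Bool := decide (u ≠ "?" ∧ u ≠ "")

theorem validB_eq_pvV (u : String) : validB u = pvV u := by
  simp [validB, pvV]; tauto

-- common characterisation: a valid unit is masked iff a valid unit follows it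
def maskSpec : List String → List String
  | [] => []
  | u :: rest => (if pvV u && rest.any pvV then "[MASK]" else u) :: maskSpec rest

theorem foldl_cnt (xs : List String) (n : Nat) :
    xs.foldl (fun n u => if u ≠ "?" ∧ u ≠ "" then n + 1 else n) n = n + xs.countP pvV := by
  induction xs generalizing n with
  | nil => simp
  | cons u rest ih =>
    by_cases h : u ≠ "?" ∧ u ≠ "" <;> simp [pvV, h, ih]; omega

theorem countP_zero_any (xs : List String) : xs.countP pvV = 0 ↔ xs.any pvV = false := by
  rw [List.countP_eq_zero, List.any_eq_false]

theorem maskLoopA_no_valid (xs : List String) (c : Nat) (h : xs.any pvV = false) :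
    maskLoopA xs c = xs := by
  induction xs generalizing c with
  | nil => rfl
  | cons u rest ih =>
    have h' : pvV u = false ∧ ∀ x ∈ rest, pvV x = false := by simpa using h
    have h2 : rest.any pvV = false := List.any_eq_false.mpr (by simpa using h'.2)
    have hu : ¬(u ≠ "?" ∧ u ≠ "") := by simpa [pvV] using h'.1
    simp [maskLoopA, hu, ih _ h2]

theorem maskSpec_no_valid (xs : List String) (h : xs.any pvV = false) : maskSpec xs = xs := by
  induction xs with
  | nil => rfl
  | cons u rest ih =>
    have h' : pvV u = false ∧ ∀ x ∈ rest, pvV x = false := by simpa using h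
    have h2 : rest.any pvV = false := List.any_eq_false.mpr (by simpa using h'.2)
    simp [maskSpec, h'.1, ih h2]

theorem maskLoopA_char (xs : List String) : maskLoopA xs (xs.countP pvV) = maskSpec xs := by
  induction xs with
  | nil => rfl
  | cons u rest ih =>
    by_cases h : u ≠ "?" ∧ u ≠ ""
    · rcases Nat.eq_zero_or_pos (rest.countP pvV) with h0 | hp
      · have hany := (countP_zero_any rest).mp h0
        simp [maskLoopA, maskSpec, pvV, h, h0, hany,
          maskLoopA_no_valid rest _ hany, maskSpec_no_valid rest hany]
      · have hany : rest.any pvV = true := by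
          cases hc : rest.any pvV
          · exact absurd ((countP_zero_any rest).mpr hc) (by omega)
          · rfl
        have hcnt : rest.countP pvV + 1 > 1 := by omega
        simp [maskLoopA, maskSpec, pvV, h, hcnt, hany, ih]
    · simp [maskLoopA, maskSpec, pvV, h, ih]

-- B-side analysis: the valid-index list of a row starting at s
def vIdxs (xs : List String) (s : Int) : List Int :=
  ((PySem.List.enumerate xs s).filter (fun p => validB p.2)).map (·.1)

theorem vIdxs_ge (xs : List String) (s i : Int) (h : i ∈ vIdxs xs s) : s ≤ i := by
  simp only [vIdxs, List.mem_map, List.mem_filter] at h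
  obtain ⟨p, ⟨hp, _⟩, rfl⟩ := h
  obtain ⟨k, hk, rfl⟩ := (PySem.List.mem_enumerate_iff _ _ _).mp hp
  simp

theorem vIdxs_cons (u : String) (rest : List String) (s : Int) :
    vIdxs (u :: rest) s = (if validB u then [s] else []) ++ vIdxs rest (s + 1) := by
  by_cases h : validB u <;>
    simp [vIdxs, PySem.List.enumerate_cons, h]

theorem vIdxs_nil_iff (xs : List String) (s : Int) :
    vIdxs xs s = [] ↔ xs.any validB = false := by
  simp only [vIdxs, List.map_eq_nil_iff, List.filter_eq_nil_iff, List.any_eq_false]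
  constructor
  · intro h u hu
    obtain ⟨k, hk, hget⟩ := List.mem_iff_getElem.mp hu
    have : (s + k, u) ∈ PySem.List.enumerate xs s :=
      (PySem.List.mem_enumerate_iff _ _ _).mpr ⟨k, hk, by simp [hget]⟩
    simpa using h _ this
  · intro h p hp
    obtain ⟨k, hk, rfl⟩ := (PySem.List.mem_enumerate_iff _ _ _).mp hp
    simpa using h _ (List.getElem_mem hk)

-- the generalized per-row equality, by induction over the row with a shifted start
theorem maskB_gen (xs : List String) (s : Int) :
    (match (vIdxs xs s).getLast? with
     | none => xs
     | some last =>
         (PySem.List.enumerate xs s).map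
           (fun p => if validB p.2 && p.1 != last then "[MASK]" else p.2)) = maskSpec xs := by
  induction xs generalizing s with
  | nil => simp [vIdxs, PySem.List.enumerate_nil, maskSpec]
  | cons u rest ih =>
    have hval : rest.any validB = rest.any pvV := by
      exact List.any_congr rfl validB_eq_pvV
    cases hany : rest.any pvV with
    | false =>
      have hnil : vIdxs rest (s + 1) = [] := (vIdxs_nil_iff _ _).mpr (hval.trans hany)
      by_cases hu : validB u
      · have hlast : (vIdxs (u :: rest) s).getLast? = some s := by
          simp [vIdxs_cons, hu, hnil]
        rw [hlast]
        have htail : (PySem.List.enumerate rest (s + 1)).map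
            (fun p => if validB p.2 && p.1 != s then "[MASK]" else p.2) = rest := by
          have : ∀ p ∈ PySem.List.enumerate rest (s + 1),
              (if validB p.2 && p.1 != s then "[MASK]" else p.2) = p.2 := by
            intro p hp
            obtain ⟨k, hk, rfl⟩ := (PySem.List.mem_enumerate_iff _ _ _).mp hp
            have : validB rest[k] = false := by
              have := List.any_eq_false.mp (hval.trans hany)
              simpa using this _ (List.getElem_mem hk)
            simp [this]
          rw [List.map_congr_left this, PySem.List.map_snd_enumerate]
        simp only [PySem.List.enumerate_cons, List.map_cons, htail]
        have hps : pvV u = true := (validB_eq_pvV u) ▸ hu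
        simp [maskSpec, hps, hany, maskSpec_no_valid rest hany]
      · have hlast : (vIdxs (u :: rest) s).getLast? = none := by
          simp [vIdxs_cons, hu, hnil]
        rw [hlast]
        have hps : pvV u = false := (validB_eq_pvV u) ▸ (by simpa using hu)
        simp [maskSpec, hps, maskSpec_no_valid rest hany]
    | true =>
      have hne : vIdxs rest (s + 1) ≠ [] := by
        intro h; rw [(vIdxs_nil_iff _ _).mp h] at hval; simp [hany] at hval
      obtain ⟨last, hlast⟩ := Option.ne_none_iff_exists'.mp
        (mt List.getLast?_eq_none_iff.mp hne)
      have hlastmem : last ∈ vIdxs rest (s + 1) := List.mem_of_getLast? hlast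
      have hlastge : s + 1 ≤ last := vIdxs_ge _ _ _ hlastmem
      have hcons : (vIdxs (u :: rest) s).getLast? = some last := by
        rw [vIdxs_cons]
        rw [List.getLast?_append_of_ne_nil _ hne, hlast]
      rw [hcons]
      have hsne : (s != last) = true := by simp; omega
      have ihr := ih (s + 1); rw [hlast] at ihr
      simp only [PySem.List.enumerate_cons, List.map_cons, ihr]
      by_cases hu : validB u <;>
        · have hps := validB_eq_pvV u
          simp [maskSpec, hu, ← hps, hsne, hany]

theorem maskItem_eq (xs : List String) : maskItemA xs = maskItemB xs := by
  have hB : maskItemB xs = maskSpec xs := by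
    simpa [maskItemB, vIdxs] using maskB_gen xs 0
  rw [hB, maskItemA, foldl_cnt, Nat.zero_add, maskLoopA_char]

-- ===== VERDICT =====
theorem masked_data_spec : Claim_equal_masked_data := by
  intro data _ _
  unfold Spec_masked_data masked_data masked_data_alt
  refine List.map_congr_left ?_
  intro kv _
  by_cases h : kv.1 == "data" <;> simp [h, funext maskItem_eq]
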